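-- pv_equiv track=rewrite | github.com/Andiq7/HTL3R_SEW_4CN_26_2214 | UE_01_Py_Intro/palindrom.py | get_dec_hex_palindrom
-- ===== SOURCE A (Python) =====
-- def is_palindrom(s: str):
--     """
--     Prüft, ob der übergebene String ein Palindrom ist.
--
--     Ein Palindrom liest sich von vorne und hinten gleich.
--
--     Beispiele:
--     >>> is_palindrom("otto")
--     True
--     >>> is_palindrom("anna")
--     True
--     >>> is_palindrom("python")
--     False
--     >>> is_palindrom("")
--     True
--     >>> is_palindrom("a")
--     True
--     """
--     return s == s[::-1]
--
-- def to_base(number:int, base:int)->str: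
--     if base < 2 or base > 36:
--         raise ValueError("Basis muss zwischen 2 und 36 liegen")
--
--     if number == 0:
--         return "0"
--
--     digits = "0123456789ABCDEFGHIJKLMNOPQRSTUVWXYZ"
--     result = ""
--
--     n = number
--     while n > 0:
--         n, remainder = divmod(n, base)
--         result = digits[remainder] + result
--
--     return result
--
-- def get_dec_hex_palindrom(x):
--     if x <= 1:
--         return -1
--
--     for n in range(x - 1, -1, -1):
--         if not is_palindrom(str(n)):
--             continue
--         hex_repr = to_base(n, 16)  # hier wird deine to_base Methode genutzt
--         if hex_repr == hex_repr[::-1]: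
--             return n
--     return -1
-- ===== SOURCE B (Python) =====
-- def _rev(n, b):
--     # value of the digit-reversal of n in base b (trailing zeros become leading and vanish)
--     r = 0
--     while n > 0:
--         n, d = divmod(n, b)
--         r = r * b + d
--     return r
--
-- def _mirror_append(h, t):
--     # append the digits of t, lowest first, after h (in base 10)
--     n = h
--     while t > 0:
--         t, d = divmod(t, 10)
--         n = n * 10 + d
--     return n
--
-- def get_dec_hex_palindrom(x):
--     if x <= 1:
--         return -1
--     # number of decimal digits of x - 1
--     L0 = 0
--     m = x - 1
--     while m > 0:
--         m //= 10
--         L0 += 1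
--     # decimal palindromes in descending order: lengths L0..1, halves descending
--     for L in range(L0, 0, -1):
--         hlen = (L + 1) // 2
--         lo = 10 ** (hlen - 1) if L > 1 else 0
--         for h in range(10 ** hlen - 1, lo - 1, -1):
--             n = _mirror_append(h, h // 10 if L % 2 == 1 else h)
--             if n >= x:
--                 continue
--             if n == _rev(n, 16):
--                 return n
--     return -1
-- ===== Notes on version B (the rewrite author's own statement) =====
-- stated objective: faster
-- what changed: A scans every integer below x downwards, string-testing each; B generates only the decimal palindromes in descending order (from their top halves, largest digit-count first) and tests each arithmetically for hex-palindromicity, never visiting non-palindromes.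
import Mathlib
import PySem

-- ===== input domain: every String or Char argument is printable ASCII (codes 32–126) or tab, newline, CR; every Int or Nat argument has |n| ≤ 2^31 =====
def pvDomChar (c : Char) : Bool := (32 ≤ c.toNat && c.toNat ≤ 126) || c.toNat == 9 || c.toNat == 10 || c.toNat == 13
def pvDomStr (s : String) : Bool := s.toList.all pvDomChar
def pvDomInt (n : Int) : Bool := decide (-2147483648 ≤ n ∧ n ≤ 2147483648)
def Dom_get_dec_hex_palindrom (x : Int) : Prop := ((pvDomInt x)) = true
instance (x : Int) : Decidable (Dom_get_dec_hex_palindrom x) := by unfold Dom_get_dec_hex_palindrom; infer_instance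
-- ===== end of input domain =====

-- B replaces A's linear downward scan over ALL integers below x by descending generation of
-- the decimal palindromes only (built from their top half), testing each for hex-palindromicity.

-- termination helper for the divmod while-loops of both ports (cited by name in decreasing_by)
theorem pvFdivToNatLt (n b : Int) (h0 : 0 < n) (hb : 2 ≤ b) :
    (PySem.Int.floordiv n b).toNat < n.toNat := by
  rw [PySem.Int.floordiv_eq_ediv_of_pos (by omega)]
  have h2 : 0 ≤ n / b := Int.ediv_nonneg (by omega) (by omega)
  have h3 : n / b * b ≤ n := Int.ediv_mul_le n (by omega)
  have h4 : n / b < n := by nlinarith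
  omega

-- ===== PORT A =====

-- s == s[::-1]; the [::-1] slice never raises (step -1 ≠ 0), so the getD default is never used
def is_palindrom (s : String) : Bool :=
  s == ((PySem.Str.slice? s none none (-1)).getD s)

-- the local constant `digits` of to_base
def pyDigits36 : List Char := "0123456789ABCDEFGHIJKLMNOPQRSTUVWXYZ".toList

-- the while-loop of to_base, strings on the List Char side (PySem convention).
-- `2 ≤ base` in the guard only makes the recursion total: to_base raises before the loop otherwise,
-- and the loop body is only reached with 2 ≤ base ≤ 36.  digits[remainder] is then always in range
-- (0 ≤ n % base < base ≤ 36), so the getD default is never used.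
def to_base_loop (n base : Int) (result : List Char) : List Char :=
  if h : 0 < n ∧ 2 ≤ base then
    to_base_loop (PySem.Int.floordiv n base) base
      ((PySem.List.pyGet? pyDigits36 (PySem.Int.mod n base)).getD ' ' :: result)
  else result
termination_by n.toNat
decreasing_by exact pvFdivToNatLt n base h.1 h.2

-- none = the ValueError branch
def to_base (number base : Int) : Option (List Char) :=
  if base < 2 ∨ base > 36 then none
  else if number = 0 then some ['0']
  else some (to_base_loop number base [])

-- the for-loop of get_dec_hex_palindrom: n counts down from x-1; falling past 0 is the
-- loop ending, after which Python returns -1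
def loopA (n : Int) : Int :=
  if h : 0 ≤ n then
    if ¬ (is_palindrom (PySem.Int.toStr n)) then loopA (n - 1)
    else
      -- to_base n 16 never raises (base 16 is in range), so the getD default is never used
      let hex_repr := (to_base n 16).getD []
      if hex_repr == ((PySem.List.slice? hex_repr none none (-1)).getD hex_repr) then n
      else loopA (n - 1)
  else -1
termination_by (n + 1).toNat
decreasing_by all_goals omega

def get_dec_hex_palindrom (x : Int) : Int :=
  if x ≤ 1 then -1 else loopA (x - 1)

-- ===== PORT B =====

-- _rev's while-loop (n, r mutate); `2 ≤ b` in the guard only makes the recursion total: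
-- Source B calls _rev with b = 16 only
def revLoop (n b r : Int) : Int :=
  if h : 0 < n ∧ 2 ≤ b then
    revLoop (PySem.Int.floordiv n b) b (r * b + PySem.Int.mod n b)
  else r
termination_by n.toNat
decreasing_by exact pvFdivToNatLt n b h.1 h.2

def pyRev (n b : Int) : Int := revLoop n b 0

-- _mirror_append's while-loop (t, n mutate)
def mirrorLoop (t n : Int) : Int :=
  if h : 0 < t then
    mirrorLoop (PySem.Int.floordiv t 10) (n * 10 + PySem.Int.mod t 10)
  else n
termination_by t.toNat
decreasing_by exact pvFdivToNatLt t 10 h (by omega)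

def pyMirrorAppend (h t : Int) : Int := mirrorLoop t h

-- the digit-count while-loop (m, L0 mutate)
def lenLoop (m L : Int) : Int :=
  if h : 0 < m then lenLoop (PySem.Int.floordiv m 10) (L + 1) else L
termination_by m.toNat
decreasing_by exact pvFdivToNatLt m 10 h (by omega)

-- inner `for h in range(10**hlen - 1, lo - 1, -1)` with its continue / early return
def innerB (x L lo h : Int) : Option Int :=
  if hge : lo ≤ h then
    let n := pyMirrorAppend h (if PySem.Int.mod L 2 = 1 then PySem.Int.floordiv h 10 else h)
    if x ≤ n then innerB x L lo (h - 1)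
    else if n = pyRev n 16 then some n
    else innerB x L lo (h - 1)
  else none
termination_by (h + 1 - lo).toNat
decreasing_by all_goals omega

-- outer `for L in range(L0, 0, -1)`; the exponents hlen and hlen-1 are ≥ 0 whenever the body runs
-- (L ≥ 1 gives hlen ≥ 1), so Int.toNat on them is exact
def outerB (x L : Int) : Option Int :=
  if hL : 0 < L then
    let hlen := PySem.Int.floordiv (L + 1) 2
    let lo : Int := if 1 < L then 10 ^ (hlen - 1).toNat else 0
    match innerB x L lo (10 ^ hlen.toNat - 1) with
    | some n => some n
    | none => outerB x (L - 1)
  else none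
termination_by L.toNat
decreasing_by all_goals omega

def get_dec_hex_palindrom_alt (x : Int) : Int :=
  if x ≤ 1 then -1
  else (outerB x (lenLoop (x - 1) 0)).getD (-1)

-- ===== PRECONDITION & SPEC =====
def Spec_get_dec_hex_palindrom (x : Int) (out : Int) : Prop := out = get_dec_hex_palindrom_alt x
instance (x : Int) (out : Int) : Decidable (Spec_get_dec_hex_palindrom x out) := by unfold Spec_get_dec_hex_palindrom; infer_instance

-- ===== CLAIM (what is proved, stated in full; the proofs are below) =====
def Claim_equal_get_dec_hex_palindrom : Prop := ∀ (x : Int), Dom_get_dec_hex_palindrom x → Spec_get_dec_hex_palindrom x (get_dec_hex_palindrom x)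

-- ===== LEMMAS AND PROOFS =====

-- ============ proof layer ============
def decPal (b m : Nat) : Prop := (Nat.digits b m).reverse = Nat.digits b m

def hexC (d : Nat) : Char := (PySem.List.pyGet? pyDigits36 (d : Int)).getD ' '

-- casts for the divmod steps (numeral divisors)
theorem fdiv16 (m : Nat) : PySem.Int.floordiv (m : Int) 16 = ((m / 16 : Nat) : Int) := by
  exact_mod_cast PySem.Int.floordiv_natCast m 16
theorem mod16 (m : Nat) : PySem.Int.mod (m : Int) 16 = ((m % 16 : Nat) : Int) := by
  exact_mod_cast PySem.Int.mod_natCast m 16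
theorem fdiv10 (m : Nat) : PySem.Int.floordiv (m : Int) 10 = ((m / 10 : Nat) : Int) := by
  exact_mod_cast PySem.Int.floordiv_natCast m 10
theorem mod10 (m : Nat) : PySem.Int.mod (m : Int) 10 = ((m % 10 : Nat) : Int) := by
  exact_mod_cast PySem.Int.mod_natCast m 10
theorem fdiv2 (m : Nat) : PySem.Int.floordiv (m : Int) 2 = ((m / 2 : Nat) : Int) := by
  exact_mod_cast PySem.Int.floordiv_natCast m 2
theorem mod2 (m : Nat) : PySem.Int.mod (m : Int) 2 = ((m % 2 : Nat) : Int) := by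
  exact_mod_cast PySem.Int.mod_natCast m 2

theorem toBaseLoop_eq (m : Nat) (acc : List Char) :
    to_base_loop (m : Int) 16 acc = ((Nat.digits 16 m).map hexC).reverse ++ acc := by
  induction m using Nat.strong_induction_on generalizing acc with
  | _ m ih =>
    rw [to_base_loop]
    by_cases hm : 0 < m
    · rw [dif_pos (by constructor <;> [exact_mod_cast hm; norm_num])]
      have hcd : PySem.Int.floordiv (m : Int) 16 = ((m / 16 : Nat) : Int) := fdiv16 m
      have hcm : PySem.Int.mod (m : Int) 16 = ((m % 16 : Nat) : Int) := mod16 m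
      rw [hcd, hcm, ih (m / 16) (Nat.div_lt_self hm (by norm_num))]
      rw [Nat.digits_def' (by norm_num : 1 < 16) hm]
      simp [hexC, List.map_cons, List.reverse_cons]
    · have : m = 0 := by omega
      subst this
      rw [dif_neg (by simp)]
      simp

theorem revLoop16_eq (m : Nat) (r : Int) :
    revLoop (m : Int) 16 r
      = ((Nat.ofDigits 16 ((Nat.digits 16 m).reverse) : Nat) : Int)
        + r * (16 : Int) ^ (Nat.digits 16 m).length := by
  induction m using Nat.strong_induction_on generalizing r with
  | _ m ih =>
    rw [revLoop]
    by_cases hm : 0 < m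
    · rw [dif_pos (by constructor <;> [exact_mod_cast hm; norm_num])]
      rw [fdiv16 m, mod16 m, ih (m / 16) (Nat.div_lt_self hm (by norm_num))]
      rw [Nat.digits_def' (by norm_num : 1 < 16) hm]
      simp only [List.reverse_cons, Nat.ofDigits_append, List.length_reverse,
        List.length_cons, Nat.ofDigits_singleton]
      push_cast
      ring
    · have : m = 0 := by omega
      subst this
      rw [dif_neg (by simp)]
      simp

theorem mirrorLoop_eq (t : Nat) (n : Int) :
    mirrorLoop (t : Int) n
      = ((Nat.ofDigits 10 ((Nat.digits 10 t).reverse) : Nat) : Int)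
        + n * (10 : Int) ^ (Nat.digits 10 t).length := by
  induction t using Nat.strong_induction_on generalizing n with
  | _ t ih =>
    rw [mirrorLoop]
    by_cases ht : 0 < t
    · rw [dif_pos (by exact_mod_cast ht)]
      rw [fdiv10 t, mod10 t, ih (t / 10) (Nat.div_lt_self ht (by norm_num))]
      rw [Nat.digits_def' (by norm_num : 1 < 10) ht]
      simp only [List.reverse_cons, Nat.ofDigits_append, List.length_reverse,
        List.length_cons, Nat.ofDigits_singleton]
      push_cast
      ring
    · have : t = 0 := by omega
      subst this
      rw [dif_neg (by simp)]
      simp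

theorem lenLoop_eq (m : Nat) (L : Int) :
    lenLoop (m : Int) L = L + (Nat.digits 10 m).length := by
  induction m using Nat.strong_induction_on generalizing L with
  | _ m ih =>
    rw [lenLoop]
    by_cases hm : 0 < m
    · rw [dif_pos (by exact_mod_cast hm)]
      rw [fdiv10 m, ih (m / 10) (Nat.div_lt_self hm (by norm_num))]
      rw [Nat.digits_def' (by norm_num : 1 < 10) hm]
      simp only [List.length_cons]
      push_cast
      ring
    · have : m = 0 := by omega
      subst this
      rw [dif_neg (by simp)]
      simp

-- a list maps to a palindrome iff it is one, when f is injective on its members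
theorem map_eq_map_of_inj {α β : Type} (f : α → β) :
    ∀ (l1 l2 : List α), (∀ a ∈ l1, ∀ b ∈ l2, f a = f b → a = b) →
      l1.map f = l2.map f → l1 = l2 := by
  intro l1
  induction l1 with
  | nil => intro l2 _ h; cases l2 <;> simp_all
  | cons a t ih =>
    intro l2 hinj h
    cases l2 with
    | nil => simp_all
    | cons b t2 =>
      simp only [List.map_cons, List.cons.injEq] at h
      have hab : a = b := hinj a (by simp) b (by simp) h.1
      have := ih t2 (fun x hx y hy => hinj x (by simp [hx]) y (by simp [hy])) h.2
      simp [hab, this]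

theorem reverse_map_pal_iff {α β : Type} (f : α → β) (l : List α)
    (hinj : ∀ a ∈ l, ∀ b ∈ l, f a = f b → a = b) :
    ((l.map f).reverse = l.map f) ↔ (l.reverse = l) := by
  constructor
  · intro h
    rw [← List.map_reverse] at h
    exact map_eq_map_of_inj f l.reverse l
      (fun a ha b hb => hinj a (by simpa using ha) b hb) h
  · intro h
    rw [← List.map_reverse, h]

-- the palindrome characterisation: digit-reversal value equals m iff the digit list is a palindrome
theorem ofDigits_rev_eq_iff (b m : Nat) (hb : 2 ≤ b) :
    Nat.ofDigits b ((Nat.digits b m).reverse) = m ↔ decPal b m := by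
  unfold decPal
  constructor
  · intro h
    rcases Nat.eq_zero_or_pos m with hm | hm
    · subst hm; simp
    by_cases hmb : m % b = 0
    · exfalso
      have hds : Nat.digits b m = m % b :: Nat.digits b (m / b) :=
        Nat.digits_def' (by omega) hm
      -- value of the reversed list is too small: it ends in the digit 0
      have hlt : Nat.ofDigits b ((Nat.digits b m).reverse) < b ^ ((Nat.digits b m).length - 1) := by
        rw [hds, hmb, List.reverse_cons, Nat.ofDigits_append]
        simp only [Nat.ofDigits_singleton, Nat.mul_zero, Nat.add_zero, List.length_reverse,
          List.length_cons]
        have : ∀ d ∈ (Nat.digits b (m / b)).reverse, d < b := by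
          intro d hd
          exact Nat.digits_lt_base (by omega) (by simpa using hd)
        simpa using Nat.ofDigits_lt_base_pow_length (by omega) this
      have hge : b ^ ((Nat.digits b m).length - 1) ≤ m := by
        rw [Nat.digits_len b m (by omega) (by omega)]
        simpa using Nat.pow_log_le_self b (by omega)
      omega
    · have hne : Nat.digits b m ≠ [] := Nat.digits_ne_nil_iff_ne_zero.mpr (by omega)
      have hrne : (Nat.digits b m).reverse ≠ [] := by simpa using hne
      have hlast : (Nat.digits b m).reverse.getLast hrne ≠ 0 := by
        rw [List.getLast_reverse]
        have : (Nat.digits b m).head hne = m % b := by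
          simp only [Nat.digits_def' (show 1 < b by omega) hm, List.head_cons]
        omega
      have := Nat.digits_ofDigits b (by omega) ((Nat.digits b m).reverse)
        (fun d hd => Nat.digits_lt_base (by omega) (by simpa using hd))
        (fun _ => hlast)
      rw [h] at this
      exact this.symm
  · intro h
    rw [h, Nat.ofDigits_digits]

-- core's Nat.toDigits is the reversed digitChar image of Nat.digits (for positive input)
theorem toDigitsCore_eq (f : Nat) : ∀ (m : Nat) (acc : List Char), 0 < m → m ≤ f →
    Nat.toDigitsCore 10 f m acc = ((Nat.digits 10 m).map Nat.digitChar).reverse ++ acc := by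
  induction f with
  | zero => intro m acc h1 h2; omega
  | succ f ih =>
    intro m acc h1 h2
    rw [Nat.toDigitsCore]
    by_cases hd : m / 10 = 0
    · rw [if_pos hd]
      have hm10 : m < 10 := by omega
      rw [Nat.digits_def' (by norm_num : 1 < 10) h1]
      rw [hd]
      simp [Nat.mod_eq_of_lt hm10]
    · rw [if_neg hd]
      rw [ih (m / 10) _ (by omega) (by omega)]
      rw [Nat.digits_def' (by norm_num : 1 < 10) h1]
      simp

theorem toDigits_eq_digits (m : Nat) (h : 0 < m) :
    Nat.toDigits 10 m = ((Nat.digits 10 m).map Nat.digitChar).reverse := by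
  unfold Nat.toDigits
  rw [toDigitsCore_eq (m + 1) m [] h (by omega)]
  simp

theorem is_palindrom_iff (s : String) : is_palindrom s = true ↔ s.toList.reverse = s.toList := by
  unfold is_palindrom
  rw [PySem.Str.slice?_none_none_neg_one]
  simp only [Option.getD_some, beq_iff_eq]
  constructor
  · intro h
    have := congrArg String.toList h
    rw [String.toList_ofList] at this
    exact this.symm
  · intro h
    rw [h, String.ofList_toList]

-- decision procedures for digit-character injectivity
theorem digitChar_injOn10 : ∀ a, a < 10 → ∀ b, b < 10 → Nat.digitChar a = Nat.digitChar b → a = b := by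
  decide

theorem hexC_injOn16 : ∀ a, a < 16 → ∀ b, b < 16 → hexC a = hexC b → a = b := by
  decide

-- A's decimal test, in terms of digit lists
theorem isPal_toStr_iff (n : Int) (hn : 0 ≤ n) :
    is_palindrom (PySem.Int.toStr n) = true ↔ decPal 10 n.toNat := by
  rw [is_palindrom_iff, PySem.Int.toList_toStr]
  unfold PySem.Int.toChars
  rw [if_neg (by omega)]
  unfold decPal
  rcases Nat.eq_zero_or_pos n.toNat with h0 | h0
  · rw [h0]
    simp [Nat.toDigits, Nat.toDigitsCore]
  · rw [toDigits_eq_digits n.toNat h0, List.reverse_reverse]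
    rw [show (List.map Nat.digitChar (Nat.digits 10 n.toNat)
          = (List.map Nat.digitChar (Nat.digits 10 n.toNat)).reverse)
        ↔ ((List.map Nat.digitChar (Nat.digits 10 n.toNat)).reverse
          = List.map Nat.digitChar (Nat.digits 10 n.toNat)) from eq_comm]
    exact reverse_map_pal_iff Nat.digitChar (Nat.digits 10 n.toNat)
      (fun a ha b hb => digitChar_injOn10 a (Nat.digits_lt_base (by norm_num) ha)
        b (Nat.digits_lt_base (by norm_num) hb))

-- A's hex test, in terms of digit lists
theorem hexTest_iff (n : Int) (hn : 0 ≤ n) :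
    (((to_base n 16).getD []) == ((PySem.List.slice? ((to_base n 16).getD []) none none (-1)).getD ((to_base n 16).getD []))) = true
      ↔ decPal 16 n.toNat := by
  obtain ⟨m, rfl⟩ : ∃ m : Nat, n = (m : Int) := ⟨n.toNat, by omega⟩
  rw [PySem.List.slice?_none_none_neg_one]
  simp only [Option.getD_some, beq_iff_eq, Int.toNat_natCast]
  unfold to_base
  rw [if_neg (by norm_num)]
  unfold decPal
  by_cases h0 : (m : Int) = 0
  · rw [if_pos h0]
    have : m = 0 := by omega
    subst this
    simp
  · rw [if_neg h0]
    simp only [Option.getD_some]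
    rw [toBaseLoop_eq m [], List.append_nil]
    rw [List.reverse_reverse]
    exact reverse_map_pal_iff hexC (Nat.digits 16 m)
      (fun a ha b hb => hexC_injOn16 a (Nat.digits_lt_base (by norm_num) ha)
        b (Nat.digits_lt_base (by norm_num) hb))

-- both tests at once: what the body of A's loop checks
def PalPair (m : Nat) : Prop := decPal 10 m ∧ decPal 16 m

theorem PalPair_zero : PalPair 0 := by constructor <;> simp [decPal]

-- one unfolding of A's loop, in terms of PalPair
theorem loopA_step_pos (n : Int) (hn : 0 ≤ n) (hp : PalPair n.toNat) : loopA n = n := by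
  rw [loopA, dif_pos hn]
  rw [if_neg (by simp [(isPal_toStr_iff n hn).mpr hp.1])]
  rw [if_pos ((hexTest_iff n hn).mpr hp.2)]

theorem loopA_step_neg (n : Int) (hn : 0 ≤ n) (hp : ¬ PalPair n.toNat) :
    loopA n = loopA (n - 1) := by
  rw [loopA, dif_pos hn]
  by_cases h10 : decPal 10 n.toNat
  · rw [if_neg (by simp [(isPal_toStr_iff n hn).mpr h10])]
    have h16 : ¬ decPal 16 n.toNat := fun h => hp ⟨h10, h⟩
    rw [if_neg (fun hh => h16 ((hexTest_iff n hn).mp hh))]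
  · rw [if_pos (fun hh => h10 ((isPal_toStr_iff n hn).mp hh))]

-- A's loop returns the greatest PalPair number ≤ n
theorem loopA_great (n : Int) (hn : 0 ≤ n) :
    0 ≤ loopA n ∧ loopA n ≤ n ∧ PalPair (loopA n).toNat ∧
      (∀ m : Int, loopA n < m → m ≤ n → ¬ PalPair m.toNat) := by
  induction hk : n.toNat using Nat.strong_induction_on generalizing n with
  | _ k ih =>
    by_cases hp : PalPair n.toNat
    · rw [loopA_step_pos n hn hp]
      exact ⟨hn, le_rfl, hp, fun m h1 h2 => by omega⟩
    · rw [loopA_step_neg n hn hp]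
      have hn0 : 0 < n := by
        rcases eq_or_lt_of_le hn with he | h
        · exfalso; apply hp; rw [← he]; simpa using PalPair_zero
        · exact h
      obtain ⟨ih1, ih2, ih3, ih4⟩ := ih (n - 1).toNat (by omega) (n - 1) (by omega) rfl
      refine ⟨ih1, by omega, ih3, fun m h1 h2 => ?_⟩
      rcases eq_or_lt_of_le h2 with he | hlt
      · rw [he]; exact hp
      · exact ih4 m h1 (by omega)

-- B's hex test, in terms of digit lists
theorem pyRev_iff (m : Nat) : ((m : Int) = pyRev (m : Int) 16) ↔ decPal 16 m := by
  unfold pyRev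
  rw [revLoop16_eq m 0]
  rw [← ofDigits_rev_eq_iff 16 m (by norm_num)]
  constructor
  · intro h; omega
  · intro h; omega

-- the decimal palindrome built from half h for digit-length L
def genN (L h : Nat) : Nat :=
  Nat.ofDigits 10 ((Nat.digits 10 (if L % 2 = 1 then h / 10 else h)).reverse ++ Nat.digits 10 h)

-- B's candidate value is genN
theorem gen_eq (L h : Nat) :
    pyMirrorAppend (h : Int) (if PySem.Int.mod (L : Int) 2 = 1 then PySem.Int.floordiv (h : Int) 10 else h)
      = ((genN L h : Nat) : Int) := by
  unfold pyMirrorAppend genN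
  rw [mod2 L, fdiv10 h]
  by_cases hL : L % 2 = 1
  · rw [if_pos (by exact_mod_cast hL), if_pos hL]
    rw [mirrorLoop_eq (h / 10) (h : Int)]
    rw [Nat.ofDigits_append]
    push_cast [Nat.ofDigits_digits, List.length_reverse]
    ring
  · rw [if_neg (by omega), if_neg hL]
    rw [mirrorLoop_eq h (h : Int)]
    rw [Nat.ofDigits_append]
    push_cast [Nat.ofDigits_digits, List.length_reverse]
    ring

-- digit count from a two-sided bound
theorem digits_length_of_bounds (h k : Nat) (hk : 1 ≤ k) (h1 : 10 ^ (k - 1) ≤ h) (h2 : h < 10 ^ k) :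
    (Nat.digits 10 h).length = k := by
  have hle : (Nat.digits 10 h).length ≤ k := (Nat.digits_length_le_iff (by norm_num) h).mpr h2
  have hgt : k - 1 < (Nat.digits 10 h).length := (Nat.lt_digits_length_iff (by norm_num) h).mpr h1
  omega

-- the half-range B enumerates for digit-length L (with K = (L+1)/2)
def InR (L h : Nat) : Prop := if L = 1 then h < 10 else 10 ^ ((L + 1) / 2 - 1) ≤ h ∧ h < 10 ^ ((L + 1) / 2)

-- the digit list of genN L h, for h > 0 in range
theorem genN_digits (L h : Nat) (hL : 1 ≤ L) (hr : InR L h) (hh : 0 < h) :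
    Nat.digits 10 (genN L h)
      = (Nat.digits 10 (if L % 2 = 1 then h / 10 else h)).reverse ++ Nat.digits 10 h := by
  unfold genN
  apply Nat.digits_ofDigits 10 (by norm_num)
  · intro d hd
    rcases List.mem_append.mp hd with hd | hd
    · exact Nat.digits_lt_base (by norm_num) (by simpa using hd)
    · exact Nat.digits_lt_base (by norm_num) hd
  · intro hne
    have hne2 : Nat.digits 10 h ≠ [] := Nat.digits_ne_nil_iff_ne_zero.mpr (by omega)
    rw [List.getLast_append_right hne2]
    exact Nat.getLast_digit_ne_zero 10 (by omega)

-- the length of the half's digit list is L - K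
theorem half_len (L h : Nat) (hL : 1 ≤ L) (hr : InR L h) (hh : 0 < h) :
    (Nat.digits 10 (if L % 2 = 1 then h / 10 else h)).length = L - (L + 1) / 2
      ∧ (Nat.digits 10 h).length = (L + 1) / 2 := by
  unfold InR at hr
  by_cases hL1 : L = 1
  · subst hL1
    rw [if_pos rfl] at hr
    rw [if_pos (by norm_num)]
    constructor
    · simp [Nat.div_eq_of_lt hr]
    · exact digits_length_of_bounds h 1 le_rfl (by simpa using hh) (by simpa using hr)
  · rw [if_neg hL1] at hr
    have hKlen : (Nat.digits 10 h).length = (L + 1) / 2 :=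
      digits_length_of_bounds h ((L + 1) / 2) (by omega) hr.1 hr.2
    refine ⟨?_, hKlen⟩
    by_cases hpar : L % 2 = 1
    · rw [if_pos hpar]
      -- K ≥ 2 since L ≥ 3 odd
      have hK2 : 2 ≤ (L + 1) / 2 := by omega
      have hd1 : 10 ^ ((L + 1) / 2 - 2) ≤ h / 10 := by
        rw [Nat.le_div_iff_mul_le (by norm_num)]
        calc 10 ^ ((L + 1) / 2 - 2) * 10 = 10 ^ ((L + 1) / 2 - 1) := by
              rw [← pow_succ]; congr 1; omega
          _ ≤ h := hr.1
      have hd2 : h / 10 < 10 ^ ((L + 1) / 2 - 1) := by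
        rw [Nat.div_lt_iff_lt_mul (by norm_num)]
        calc h < 10 ^ ((L + 1) / 2) := hr.2
          _ = 10 ^ ((L + 1) / 2 - 1) * 10 := by rw [← pow_succ]; congr 1; omega
      have := digits_length_of_bounds (h / 10) ((L + 1) / 2 - 1) (by omega) (by
        rw [show (L + 1) / 2 - 1 - 1 = (L + 1) / 2 - 2 by omega]; exact hd1) hd2
      rw [this]; omega
    · rw [if_neg hpar, hKlen]; omega

-- genN is a decimal palindrome
theorem genN_pal (L h : Nat) (hL : 1 ≤ L) (hr : InR L h) : decPal 10 (genN L h) := by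
  rcases Nat.eq_zero_or_pos h with h0 | h0
  · subst h0
    have : genN L 0 = 0 := by unfold genN; simp
    rw [this]; simp [decPal]
  unfold decPal
  rw [genN_digits L h hL hr h0]
  by_cases hpar : L % 2 = 1
  · rw [if_pos hpar]
    rw [Nat.digits_def' (by norm_num : 1 < 10) h0]
    simp only [List.reverse_append, List.reverse_reverse, List.reverse_cons]
    simp
  · rw [if_neg hpar]
    simp

-- genN has exactly L digits (h > 0 in range)
theorem genN_len (L h : Nat) (hL : 1 ≤ L) (hr : InR L h) (hh : 0 < h) :
    (Nat.digits 10 (genN L h)).length = L := by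
  rw [genN_digits L h hL hr hh]
  obtain ⟨h1, h2⟩ := half_len L h hL hr hh
  rw [List.length_append, List.length_reverse, h1, h2]
  omega

-- value bounds from the digit count
theorem genN_bounds (L h : Nat) (hL : 1 ≤ L) (hr : InR L h) (hh : 0 < h) :
    10 ^ (L - 1) ≤ genN L h ∧ genN L h < 10 ^ L := by
  have hlen := genN_len L h hL hr hh
  have hne : genN L h ≠ 0 := by
    intro h0
    rw [h0] at hlen
    simp at hlen
    omega
  constructor
  · have := Nat.lt_digits_length_iff (b := 10) (k := L - 1) (by norm_num) (genN L h)
    rw [hlen] at this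
    exact this.mp (by omega)
  · have := Nat.digits_length_le_iff (b := 10) (k := L) (by norm_num) (genN L h)
    rw [hlen] at this
    exact this.mp le_rfl

-- decomposition used for monotonicity: genN = low part + 10^(L-K) * h
theorem genN_decomp (L h : Nat) :
    genN L h = Nat.ofDigits 10 ((Nat.digits 10 (if L % 2 = 1 then h / 10 else h)).reverse)
      + 10 ^ (Nat.digits 10 (if L % 2 = 1 then h / 10 else h)).length * h := by
  unfold genN
  rw [Nat.ofDigits_append, Nat.ofDigits_digits, List.length_reverse]

-- strictly monotone in the half (same L, both in range)
theorem genN_mono (L h1 h2 : Nat) (hL : 1 ≤ L) (hr1 : InR L h1) (hr2 : InR L h2)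
    (hlt : h1 < h2) : genN L h1 < genN L h2 := by
  have hh2 : 0 < h2 := by omega
  obtain ⟨hl1, _⟩ := half_len L h2 hL hr2 hh2
  rcases Nat.eq_zero_or_pos h1 with h0 | h0
  · have : genN L h1 = 0 := by subst h0; unfold genN; simp
    rw [this]
    rw [genN_decomp L h2]
    positivity
  obtain ⟨hl0, _⟩ := half_len L h1 hL hr1 h0
  rw [genN_decomp L h1, genN_decomp L h2, hl0, hl1]
  have hlow : Nat.ofDigits 10 ((Nat.digits 10 (if L % 2 = 1 then h1 / 10 else h1)).reverse)
      < 10 ^ (L - (L + 1) / 2) := by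
    have := Nat.ofDigits_lt_base_pow_length (b := 10) (by norm_num)
      (l := (Nat.digits 10 (if L % 2 = 1 then h1 / 10 else h1)).reverse)
      (fun d hd => Nat.digits_lt_base (by norm_num) (by simpa using hd))
    rwa [List.length_reverse, hl0] at this
  calc Nat.ofDigits 10 ((Nat.digits 10 (if L % 2 = 1 then h1 / 10 else h1)).reverse)
        + 10 ^ (L - (L + 1) / 2) * h1
      < 10 ^ (L - (L + 1) / 2) + 10 ^ (L - (L + 1) / 2) * h1 := by omega
    _ = 10 ^ (L - (L + 1) / 2) * (h1 + 1) := by ring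
    _ ≤ 10 ^ (L - (L + 1) / 2) * h2 := Nat.mul_le_mul_left _ (by omega)
    _ ≤ Nat.ofDigits 10 ((Nat.digits 10 (if L % 2 = 1 then h2 / 10 else h2)).reverse)
        + 10 ^ (L - (L + 1) / 2) * h2 := by omega

-- every positive decimal palindrome is generated: from m recover its half
theorem genN_complete (m : Nat) (hm : 0 < m) (hp : decPal 10 m) :
    ∃ h : Nat, InR (Nat.digits 10 m).length h
      ∧ genN (Nat.digits 10 m).length h = m := by
  set L := (Nat.digits 10 m).length with hLdef
  set K := (L + 1) / 2 with hKdef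
  have hL1 : 1 ≤ L := by
    have : Nat.digits 10 m ≠ [] := Nat.digits_ne_nil_iff_ne_zero.mpr (by omega)
    have := List.length_pos_iff.mpr this
    omega
  have hsne : (Nat.digits 10 m).drop (L - K) ≠ [] := by
    apply List.ne_nil_of_length_pos
    rw [List.length_drop, ← hLdef]
    omega
  have hslen : ((Nat.digits 10 m).drop (L - K)).length = K := by
    rw [List.length_drop, ← hLdef]
    omega
  have hds : Nat.digits 10 (Nat.ofDigits 10 ((Nat.digits 10 m).drop (L - K)))
      = (Nat.digits 10 m).drop (L - K) := by
    apply Nat.digits_ofDigits 10 (by norm_num)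
    · intro d hd
      exact Nat.digits_lt_base (by norm_num) (List.mem_of_mem_drop hd)
    · intro hne
      rw [List.getLast_drop]
      exact Nat.getLast_digit_ne_zero 10 (by omega)
  set h := Nat.ofDigits 10 ((Nat.digits 10 m).drop (L - K)) with hhdef
  have hh0 : 0 < h := by
    rcases Nat.eq_zero_or_pos h with h0 | h0
    · exfalso
      rw [h0] at hds
      exact hsne (by simpa using hds.symm)
    · exact h0
  have hhlt : h < 10 ^ K := by
    have := Nat.digits_length_le_iff (b := 10) (k := K) (by norm_num) h
    rw [hds, hslen] at this
    exact this.mp le_rfl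
  have hhge : 10 ^ (K - 1) ≤ h := by
    have := Nat.lt_digits_length_iff (b := 10) (k := K - 1) (by norm_num) h
    rw [hds, hslen] at this
    exact this.mp (by omega)
  have hr : InR L h := by
    unfold InR
    by_cases hL1' : L = 1
    · rw [if_pos hL1']
      have hK1 : K = 1 := by rw [hKdef, hL1']
      rw [hK1] at hhlt
      simpa using hhlt
    · rw [if_neg hL1']
      exact ⟨hhge, hhlt⟩
  refine ⟨h, hr, ?_⟩
  unfold genN
  rw [hds]
  have key : (Nat.digits 10 (if L % 2 = 1 then h / 10 else h)).reverse
      ++ (Nat.digits 10 m).drop (L - K) = Nat.digits 10 m := by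
    by_cases hpar : L % 2 = 1
    · rw [if_pos hpar]
      have hdt : Nat.digits 10 (h / 10) = (Nat.digits 10 m).drop K := by
        have h1 : Nat.digits 10 h = h % 10 :: Nat.digits 10 (h / 10) :=
          Nat.digits_def' (by norm_num : 1 < 10) hh0
        rw [hds] at h1
        have h2 : ((Nat.digits 10 m).drop (L - K)).tail = Nat.digits 10 (h / 10) := by
          rw [h1, List.tail_cons]
        rw [← h2, List.tail_drop]
        congr 1
        omega
      rw [hdt, List.reverse_drop, hp, ← hLdef]
      rw [show L - K = K - 1 by omega]
      exact List.take_append_drop _ _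
    · rw [if_neg hpar]
      rw [hds, List.reverse_drop, hp, ← hLdef]
      rw [show L - (L - K) = K by omega, show L - K = K by omega]
      exact List.take_append_drop _ _
  rw [key, Nat.ofDigits_digits]

-- what B's inner test accepts
def Pred (x : Int) (n : Nat) : Prop := (n : Int) < x ∧ decPal 16 n

theorem innerB_spec (x : Int) (L : Nat) (lo : Int) (hlo : 0 ≤ lo) (h : Int) :
    (∀ r, innerB x (L : Int) lo h = some r →
        ∃ h' : Int, lo ≤ h' ∧ h' ≤ h ∧ r = ((genN L h'.toNat : Nat) : Int)
          ∧ Pred x (genN L h'.toNat)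
          ∧ ∀ h'' : Int, h' < h'' → h'' ≤ h → ¬ Pred x (genN L h''.toNat))
    ∧ (innerB x (L : Int) lo h = none →
        ∀ h' : Int, lo ≤ h' → h' ≤ h → ¬ Pred x (genN L h'.toNat)) := by
  induction hk : (h + 1 - lo).toNat using Nat.strong_induction_on generalizing h with
  | _ k ih =>
    rw [innerB]
    by_cases hge : lo ≤ h
    · rw [dif_pos hge]
      have hcast : (h : Int) = ((h.toNat : Nat) : Int) := by omega
      have hgen : pyMirrorAppend h (if PySem.Int.mod (L : Int) 2 = 1 then PySem.Int.floordiv h 10 else h)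
          = ((genN L h.toNat : Nat) : Int) := by
        rw [hcast]
        exact gen_eq L h.toNat
      rw [hgen]
      obtain ⟨ihs, ihn⟩ := ih (h - 1 + 1 - lo).toNat (by omega) (h - 1) rfl
      by_cases hle : x ≤ ((genN L h.toNat : Nat) : Int)
      · rw [if_pos hle]
        have hnp : ¬ Pred x (genN L h.toNat) := fun hP => by
          have := hP.1; omega
        constructor
        · intro r hr
          obtain ⟨h', p1, p2, p3, p4, p5⟩ := ihs r hr
          refine ⟨h', p1, by omega, p3, p4, fun h'' q1 q2 => ?_⟩
          rcases eq_or_lt_of_le q2 with he | hlt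
          · rw [he]; exact hnp
          · exact p5 h'' q1 (by omega)
        · intro hr h' q1 q2
          rcases eq_or_lt_of_le q2 with he | hlt
          · rw [he]; exact hnp
          · exact ihn hr h' q1 (by omega)
      · rw [if_neg hle]
        by_cases heq : ((genN L h.toNat : Nat) : Int) = pyRev ((genN L h.toNat : Nat) : Int) 16
        · rw [if_pos heq]
          constructor
          · intro r hr
            refine ⟨h, hge, le_rfl, by simpa using hr.symm, ?_, fun h'' q1 q2 => by omega⟩
            exact ⟨by omega, (pyRev_iff (genN L h.toNat)).mp heq⟩
          · intro hr; cases hr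
        · rw [if_neg heq]
          have hnp : ¬ Pred x (genN L h.toNat) := fun hP =>
            heq ((pyRev_iff (genN L h.toNat)).mpr hP.2)
          constructor
          · intro r hr
            obtain ⟨h', p1, p2, p3, p4, p5⟩ := ihs r hr
            refine ⟨h', p1, by omega, p3, p4, fun h'' q1 q2 => ?_⟩
            rcases eq_or_lt_of_le q2 with he | hlt
            · rw [he]; exact hnp
            · exact p5 h'' q1 (by omega)
          · intro hr h' q1 q2
            rcases eq_or_lt_of_le q2 with he | hlt
            · rw [he]; exact hnp
            · exact ihn hr h' q1 (by omega)
    · rw [dif_neg hge]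
      constructor
      · intro r hr
        exact absurd hr (by simp)
      · intro _ h' q1 q2
        omega

-- translate the Int counter range of the inner loop into InR
theorem range_iff (L : Nat) (hL : 1 ≤ L) (h' : Int)
    (hlo : (if (1 : Int) < (L : Int) then ((10 ^ ((L + 1) / 2 - 1) : Nat) : Int) else 0) ≤ h')
    (hhi : h' ≤ ((10 ^ ((L + 1) / 2) : Nat) : Int) - 1) : InR L h'.toNat := by
  unfold InR
  by_cases hL1 : L = 1
  · rw [if_pos hL1]
    subst hL1
    rw [if_neg (by norm_num)] at hlo
    norm_num at hhi ⊢
    omega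
  · rw [if_neg hL1]
    rw [if_pos (by exact_mod_cast (by omega : (1 : Int) < (L : Int)))] at hlo
    obtain ⟨m, rfl⟩ : ∃ m : Nat, h' = (m : Int) :=
      ⟨h'.toNat, by have : (0:Int) ≤ h' := le_trans (by positivity) hlo; omega⟩
    rw [Int.toNat_natCast]
    constructor
    · exact_mod_cast hlo
    · have : (m : Int) + 1 ≤ ((10 ^ ((L + 1) / 2) : Nat) : Int) := by omega
      exact_mod_cast this

theorem range_back (L : Nat) (hL : 1 ≤ L) (h'' : Nat) (hr : InR L h'') :
    (if (1 : Int) < (L : Int) then ((10 ^ ((L + 1) / 2 - 1) : Nat) : Int) else 0) ≤ (h'' : Int)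
      ∧ (h'' : Int) ≤ ((10 ^ ((L + 1) / 2) : Nat) : Int) - 1 := by
  unfold InR at hr
  by_cases hL1 : L = 1
  · rw [if_pos hL1] at hr
    subst hL1
    rw [if_neg (by norm_num)]
    norm_num
    omega
  · rw [if_neg hL1] at hr
    rw [if_pos (by exact_mod_cast (by omega : (1 : Int) < (L : Int)))]
    omega

theorem outerB_spec (x : Int) (L : Nat) :
    (∀ r, outerB x (L : Int) = some r →
        ∃ (L' h' : Nat), 1 ≤ L' ∧ L' ≤ L ∧ InR L' h'
          ∧ r = ((genN L' h' : Nat) : Int) ∧ Pred x (genN L' h')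
          ∧ (∀ h'' : Nat, InR L' h'' → h' < h'' → ¬ Pred x (genN L' h''))
          ∧ (∀ L'' : Nat, L' < L'' → L'' ≤ L → ∀ h'' : Nat, InR L'' h'' → ¬ Pred x (genN L'' h'')))
    ∧ (outerB x (L : Int) = none →
        ∀ L'' : Nat, 1 ≤ L'' → L'' ≤ L → ∀ h'' : Nat, InR L'' h'' → ¬ Pred x (genN L'' h'')) := by
  induction L with
  | zero =>
    rw [outerB, dif_neg (by norm_num)]
    constructor
    · intro r hr; exact absurd hr (by simp)
    · intro _ L'' q1 q2; omega
  | succ L ihL =>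
    rw [outerB, dif_pos (by exact_mod_cast Nat.succ_pos L)]
    simp only []
    set K := (L + 1 + 1) / 2 with hKdef
    have hlen_eq : PySem.Int.floordiv (((L + 1 : Nat) : Int) + 1) 2 = ((K : Nat) : Int) := by
      rw [show (((L + 1 : Nat) : Int) + 1) = ((L + 1 + 1 : Nat) : Int) by push_cast; ring]
      exact fdiv2 (L + 1 + 1)
    rw [hlen_eq]
    have hK1 : 1 ≤ K := by omega
    have hlo_eq : (if (1:Int) < ((L + 1 : Nat) : Int) then (10:Int) ^ (((K : Nat) : Int) - 1).toNat else 0)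
        = (if (1:Int) < ((L + 1 : Nat) : Int) then ((10 ^ (K - 1) : Nat) : Int) else 0) := by
      by_cases h1 : (1:Int) < ((L + 1 : Nat) : Int)
      · rw [if_pos h1, if_pos h1]
        rw [show (((K : Nat) : Int) - 1).toNat = K - 1 by omega]
        push_cast
        ring
      · rw [if_neg h1, if_neg h1]
    rw [hlo_eq]
    have hhi_eq : (10:Int) ^ (((K : Nat) : Int)).toNat - 1 = ((10 ^ K : Nat) : Int) - 1 := by
      rw [Int.toNat_natCast]
      push_cast
      ring
    rw [hhi_eq]
    have hlo_nonneg : 0 ≤ (if (1:Int) < ((L + 1 : Nat) : Int) then ((10 ^ (K - 1) : Nat) : Int) else 0) := by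
      by_cases h1 : (1:Int) < ((L + 1 : Nat) : Int)
      · rw [if_pos h1]; positivity
      · rw [if_neg h1]
    obtain ⟨hin_s, hin_n⟩ := innerB_spec x (L + 1)
      (if (1:Int) < ((L + 1 : Nat) : Int) then ((10 ^ (K - 1) : Nat) : Int) else 0) hlo_nonneg
      (((10 ^ K : Nat) : Int) - 1)
    obtain ⟨ihs, ihn⟩ := ihL
    rcases hinner : innerB x ((L + 1 : Nat) : Int)
        (if (1:Int) < ((L + 1 : Nat) : Int) then ((10 ^ (K - 1) : Nat) : Int) else 0)
        (((10 ^ K : Nat) : Int) - 1) with _ | n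
    · -- inner found nothing at length L+1: recurse
      simp only []
      have hfail : ∀ h'' : Nat, InR (L + 1) h'' → ¬ Pred x (genN (L + 1) h'') := by
        intro h'' hr''
        obtain ⟨b1, b2⟩ := range_back (L + 1) (by omega) h'' hr''
        have := hin_n hinner (h'' : Int) b1 b2
        simpa using this
      have hrec : ((L + 1 : Nat) : Int) - 1 = ((L : Nat) : Int) := by push_cast; ring
      rw [hrec]
      constructor
      · intro r hr
        obtain ⟨L', h', p1, p2, p3, p4, p5, p6, p7⟩ := ihs r hr
        refine ⟨L', h', p1, by omega, p3, p4, p5, p6, fun L'' q1 q2 => ?_⟩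
        rcases eq_or_lt_of_le q2 with he | hlt
        · rw [he]; exact hfail
        · exact p7 L'' q1 (by omega)
      · intro hr L'' q1 q2
        rcases eq_or_lt_of_le q2 with he | hlt
        · rw [he]; exact hfail
        · exact ihn hr L'' q1 (by omega)
    · -- inner found n
      simp only []
      constructor
      · intro r hr
        have hrn : r = n := by simpa using hr.symm
        obtain ⟨h', p1, p2, p3, p4, p5⟩ := hin_s n hinner
        have hr' : InR (L + 1) h'.toNat := range_iff (L + 1) (by omega) h' p1 p2
        refine ⟨L + 1, h'.toNat, by omega, le_rfl, hr', by rw [hrn]; exact p3, p4, ?_, ?_⟩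
        · intro h'' q1 q2
          obtain ⟨b1, b2⟩ := range_back (L + 1) (by omega) h'' q1
          have := p5 (h'' : Int) (by omega) b2
          simpa using this
        · intro L'' q1 q2 h'' q3
          omega
      · intro hr; exact absurd hr (by simp)

theorem genN_one_zero : genN 1 0 = 0 := by
  unfold genN
  norm_num

theorem InR_one_zero : InR 1 0 := by
  unfold InR
  norm_num

theorem main_eq (x : Int) : get_dec_hex_palindrom x = get_dec_hex_palindrom_alt x := by
  unfold get_dec_hex_palindrom get_dec_hex_palindrom_alt
  by_cases hx : x ≤ 1
  · rw [if_pos hx, if_pos hx]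
  · rw [if_neg hx, if_neg hx]
    have hx2 : 2 ≤ x := by omega
    obtain ⟨m1, hm1⟩ : ∃ m1 : Nat, x - 1 = (m1 : Int) := ⟨(x - 1).toNat, by omega⟩
    have hm1pos : 0 < m1 := by omega
    rw [hm1, lenLoop_eq m1 0, zero_add]
    set L0n := (Nat.digits 10 m1).length with hL0def
    have hL0 : 1 ≤ L0n := by
      have h1 : Nat.digits 10 m1 ≠ [] := Nat.digits_ne_nil_iff_ne_zero.mpr (by omega)
      have := List.length_pos_iff.mpr h1
      omega
    obtain ⟨hout_s, hout_n⟩ := outerB_spec x L0n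
    rcases hout : outerB x ((L0n : Nat) : Int) with _ | r
    · exfalso
      have := hout_n hout 1 le_rfl hL0 0 InR_one_zero
      apply this
      rw [genN_one_zero]
      exact ⟨by omega, by simp [decPal]⟩
    · obtain ⟨ha0, ha1, ha2, ha3⟩ := loopA_great (x - 1) (by omega)
      obtain ⟨L', h', p1, p2, p3, p4, p5, p6, p7⟩ := hout_s r hout
      simp only [Option.getD_some]
      -- r is a PalPair value below x
      have hrpal : PalPair r.toNat := by
        rw [p4, Int.toNat_natCast]
        exact ⟨genN_pal L' h' p1 p3, p5.2⟩
      have hrlt : r < x := by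
        rw [p4]
        exact p5.1
      have hr0 : 0 ≤ r := by rw [p4]; positivity
      -- A's result is not below r
      have h1 : ¬ loopA (x - 1) < r := fun hlt =>
        ha3 r hlt (by omega) hrpal
      -- and r is not below A's result
      have h2 : ¬ r < loopA (x - 1) := by
        intro hlt
        set m := (loopA (x - 1)).toNat with hmdef
        have hm0 : 0 < m := by omega
        obtain ⟨hstar, hrin, hgen⟩ := genN_complete m hm0 ha2.1
        set Lm := (Nat.digits 10 m).length with hLmdef
        have hLmle : Lm ≤ L0n := Nat.le_length_digits_le 10 m m1 (by omega)
        have hmpred : Pred x (genN Lm hstar) := by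
          rw [hgen]
          exact ⟨by omega, ha2.2⟩
        have hL'1 : 1 ≤ Lm := by
          have h1 : Nat.digits 10 m ≠ [] := Nat.digits_ne_nil_iff_ne_zero.mpr (by omega)
          have := List.length_pos_iff.mpr h1
          omega
        have hmr : r.toNat < m := by omega
        rcases Nat.lt_trichotomy Lm L' with hc | hc | hc
        · -- impossible: m would be smaller than r
          rcases Nat.eq_zero_or_pos h' with h'0 | h'0
          · -- h' = 0 forces L' = 1
            have : L' = 1 := by
              by_contra hne
              unfold InR at p3
              rw [if_neg hne] at p3
              have := p3.1
              have : 0 < 10 ^ ((L' + 1) / 2 - 1) := by positivity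
              omega
            omega
          · have hb := (genN_bounds L' h' p1 p3 h'0).1
            have hmb : m < 10 ^ Lm := Nat.lt_base_pow_length_digits (by norm_num)
            have hpow : 10 ^ Lm ≤ 10 ^ (L' - 1) := Nat.pow_le_pow_right (by norm_num) (by omega)
            have : r.toNat = genN L' h' := by rw [p4]; simp
            omega
        · -- same length: the half of m is larger, contradicting inner maximality
          apply p6 hstar (hc ▸ hrin)
          · -- h' < hstar
            by_contra hle
            rw [Nat.not_lt] at hle
            have : r.toNat = genN L' h' := by rw [p4]; simp
            rcases Nat.lt_or_ge hstar h' with hlt2 | hge2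
            · have := genN_mono L' hstar h' p1 (hc ▸ hrin) p3 hlt2
              rw [hc] at hgen
              omega
            · have : hstar = h' := by omega
              rw [this, hc] at hgen
              omega
          · rw [← hc]
            exact hmpred
        · -- m has strictly more digits: contradicts that all longer lengths failed
          exact p7 Lm hc hLmle hstar hrin hmpred
      have : loopA (x - 1) = r := by omega
      rw [hm1] at this
      exact this

-- ===== VERDICT (by name: the statement is the Claim_ definition above) =====
theorem get_dec_hex_palindrom_spec : Claim_equal_get_dec_hex_palindrom := by
  intro x _
  unfold Spec_get_dec_hex_palindrom
  exact main_eq x
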